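-- pv_equiv track=rewrite | github.com/tiagocoutinho/scpi-protocol | scpi/__init__.py | cmd_expr_to_reg_expr_str
-- ===== SOURCE A (Python) =====
-- def cmd_expr_to_reg_expr_str(cmd_expr):
--     """
--     Return a regular expression string from the given SCPI command expression.
--     """
--     # Basicaly we replace [] -> ()?, and LOWercase -> LOW(ercase)?
--     # Also we add :? optional to the start and $ to the end to make sure
--     # we have an exact match
--     reg_expr, low_zone = r"\:?", False
--     for c in cmd_expr:
--         cl = c.islower()
--         if not cl:
--             if low_zone:
--                 reg_expr += ")?"
--             low_zone = False
--         if c == "[":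
--             reg_expr += "("
--         elif c == "]":
--             reg_expr += ")?"
--         elif cl:
--             if not low_zone:
--                 reg_expr += "("
--             low_zone = True
--             reg_expr += c.upper()
--         elif c in "*:":
--             reg_expr += "\\" + c
--         else:
--             reg_expr += c
--
--     # if cmd expr ends in lower case we close the optional zone 'by hand'
--     if low_zone:
--         reg_expr += ")?"
--
--     return reg_expr + "$"
-- ===== SOURCE B (Python) =====
-- from itertools import groupby
--
--
-- def cmd_expr_to_reg_expr_str(cmd_expr):
--     """
--     Return a regular expression string from the given SCPI command expression.
--     Run-based decomposition: lowercase runs become one optional group each.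
--     """
--     parts = [r"\:?"]
--     for is_lower, run in groupby(cmd_expr, key=str.islower):
--         if is_lower:
--             parts.append("(" + "".join(c.upper() for c in run) + ")?")
--         else:
--             for c in run:
--                 if c == "[":
--                     parts.append("(")
--                 elif c == "]":
--                     parts.append(")?")
--                 elif c in "*:":
--                     parts.append("\\" + c)
--                 else:
--                     parts.append(c)
--     parts.append("$")
--     return "".join(parts)
-- ===== Notes on version B (the rewrite author's own statement) =====
-- stated objective: alternative
-- what changed: Replaces A's char-by-char loop with a low_zone flag threaded through every branch by a run-based decomposition: groupby(cmd_expr, key=str.islower) turns each maximal lowercase run into one optional uppercased group and processes non-lowercase runs per character, eliminating the flag and the deferred close.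
import Mathlib
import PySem

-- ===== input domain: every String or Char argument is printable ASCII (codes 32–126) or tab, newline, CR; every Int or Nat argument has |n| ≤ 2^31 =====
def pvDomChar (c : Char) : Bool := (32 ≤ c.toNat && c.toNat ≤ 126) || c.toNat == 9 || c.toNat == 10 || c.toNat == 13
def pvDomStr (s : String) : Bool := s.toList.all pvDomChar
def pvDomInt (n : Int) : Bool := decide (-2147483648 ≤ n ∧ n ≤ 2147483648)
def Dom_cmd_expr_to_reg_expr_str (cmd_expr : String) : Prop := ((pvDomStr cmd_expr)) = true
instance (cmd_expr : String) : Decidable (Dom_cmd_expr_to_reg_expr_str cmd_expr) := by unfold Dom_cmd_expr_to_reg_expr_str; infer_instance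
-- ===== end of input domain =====

-- B replaces A's char-by-char loop with a stateful flag by a run-based decomposition
-- (groupby on islower): alternative structure, same cost; no speed claim.

-- ===== PORT A =====
-- one step of A's for-loop over (reg_expr, low_zone)
def pvStepA (acc : String × Bool) (c : Char) : String × Bool :=
  let cl := PySem.Chars.islower c
  let reg := if !cl && acc.2 then acc.1 ++ ")?" else acc.1
  let low := if !cl then false else acc.2
  if c = '[' then (reg ++ "(", low)
  else if c = ']' then (reg ++ ")?", low)
  else if cl then ((if !low then reg ++ "(" else reg) ++ String.singleton (PySem.Chars.upperChar c), true)
  else if c = '*' ∨ c = ':' then (reg ++ "\\" ++ String.singleton c, low)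
  else (reg ++ String.singleton c, low)

-- "if cmd expr ends in lower case we close the optional zone 'by hand'"
def pvFinishA (acc : String × Bool) : String := if acc.2 then acc.1 ++ ")?" else acc.1

def cmd_expr_to_reg_expr_str (cmd_expr : String) : String :=
  pvFinishA (cmd_expr.toList.foldl pvStepA ("\\:?", false)) ++ "$"

-- ===== PORT B =====
-- translation of one non-lowercase character (the inner loop body of Source B)
def pvProc (c : Char) : String :=
  if c = '[' then "("
  else if c = ']' then ")?"
  else if c = '*' ∨ c = ':' then "\\" ++ String.singleton c
  else String.singleton c

-- groupby(cmd_expr, key=str.islower): peel off one maximal run at a time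
def pvGroups : List Char → String
  | [] => ""
  | c :: rest =>
    if h : PySem.Chars.islower c = true then
      "(" ++ String.ofList (((c :: rest).takeWhile PySem.Chars.islower).map PySem.Chars.upperChar)
        ++ ")?" ++ pvGroups ((c :: rest).dropWhile PySem.Chars.islower)
    else
      String.join (((c :: rest).takeWhile (fun d => !PySem.Chars.islower d)).map pvProc)
        ++ pvGroups ((c :: rest).dropWhile (fun d => !PySem.Chars.islower d))
termination_by l => l.length
decreasing_by
  · simp only [List.dropWhile_cons, h]
    have := List.length_dropWhile_le PySem.Chars.islower rest
    simp; omega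
  · simp only [List.dropWhile_cons, h]
    have := List.length_dropWhile_le (fun d => !PySem.Chars.islower d) rest
    simp [h]; omega

def cmd_expr_to_reg_expr_str_alt (cmd_expr : String) : String :=
  "\\:?" ++ pvGroups cmd_expr.toList ++ "$"

-- ===== PRECONDITION & SPEC =====
def Spec_cmd_expr_to_reg_expr_str (cmd_expr : String) (out : String) : Prop := out = cmd_expr_to_reg_expr_str_alt cmd_expr
instance (cmd_expr : String) (out : String) : Decidable (Spec_cmd_expr_to_reg_expr_str cmd_expr out) := by unfold Spec_cmd_expr_to_reg_expr_str; infer_instance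

-- ===== CLAIM (what is proved, stated in full; the proofs are below) =====
def Claim_equal_cmd_expr_to_reg_expr_str : Prop := ∀ (cmd_expr : String), Dom_cmd_expr_to_reg_expr_str cmd_expr → Spec_cmd_expr_to_reg_expr_str cmd_expr (cmd_expr_to_reg_expr_str cmd_expr)

-- ===== LEMMAS AND PROOFS =====

-- what B still owes when A's loop is inside a lowercase zone
def pvLowRest (l : List Char) : String :=
  String.ofList ((l.takeWhile PySem.Chars.islower).map PySem.Chars.upperChar) ++ ")?"
    ++ pvGroups (l.dropWhile PySem.Chars.islower)

lemma pvJoin_nil : String.join [] = "" := rfl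

lemma pvFoldl_append (xs : List String) (a b : String) :
    xs.foldl (· ++ ·) (a ++ b) = a ++ xs.foldl (· ++ ·) b := by
  induction xs generalizing b with
  | nil => simp
  | cons y ys ih => simp only [List.foldl_cons, String.append_assoc, ih]

lemma pvJoin_cons (x : String) (xs : List String) :
    String.join (x :: xs) = x ++ String.join xs := by
  have h : ("" : String) ++ x = x ++ "" := by
    rw [← String.toList_inj]; simp [String.toList_append]
  simp only [String.join, List.foldl_cons, h, pvFoldl_append]

lemma pvGroups_cons_low {c : Char} (l : List Char) (h : PySem.Chars.islower c = true) :
    pvGroups (c :: l) = "(" ++ String.singleton (PySem.Chars.upperChar c) ++ pvLowRest l := by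
  rw [pvGroups]
  simp only [h, ↓reduceDIte, pvLowRest, List.takeWhile_cons, List.dropWhile_cons, if_true,
    List.map_cons]
  rw [← String.toList_inj]
  simp [String.toList_append, String.toList_ofList, String.toList_singleton]

lemma pvGroups_cons_nonlow {c : Char} (l : List Char) (h : PySem.Chars.islower c = false) :
    pvGroups (c :: l) = pvProc c ++ pvGroups l := by
  rw [pvGroups]
  simp only [h, Bool.false_eq_true, ↓reduceDIte, List.takeWhile_cons, Bool.not_false,
    if_true, List.map_cons, pvJoin_cons, List.dropWhile_cons]
  cases l with
  | nil =>
    rw [← String.toList_inj]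
    simp [pvGroups, pvJoin_nil, String.toList_append]
  | cons d t =>
    by_cases hd : PySem.Chars.islower d = true
    · rw [← String.toList_inj]
      simp [hd, pvJoin_nil, String.toList_append]
    · simp only [Bool.not_eq_true] at hd
      rw [pvGroups]
      simp only [hd, Bool.false_eq_true, ↓reduceDIte, List.takeWhile_cons, Bool.not_false,
        if_true, List.map_cons, pvJoin_cons, List.dropWhile_cons]
      rw [← String.toList_inj]
      simp [String.toList_append]

lemma pvLowRest_cons_low {c : Char} (l : List Char) (h : PySem.Chars.islower c = true) :
    pvLowRest (c :: l) = String.singleton (PySem.Chars.upperChar c) ++ pvLowRest l := by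
  simp only [pvLowRest, List.takeWhile_cons, List.dropWhile_cons, h, if_true, List.map_cons]
  rw [← String.toList_inj]
  simp [String.toList_append, String.toList_ofList, String.toList_singleton]

lemma pvLowRest_cons_nonlow {c : Char} (l : List Char) (h : PySem.Chars.islower c = false) :
    pvLowRest (c :: l) = ")?" ++ pvGroups (c :: l) := by
  simp only [pvLowRest, List.takeWhile_cons, List.dropWhile_cons, h, Bool.false_eq_true,
    if_false, List.map_nil]
  rw [← String.toList_inj]
  simp [String.toList_append, String.toList_ofList]

lemma pvMain : ∀ (l : List Char) (reg : String) (low : Bool),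
    pvFinishA (l.foldl pvStepA (reg, low)) = reg ++ (if low then pvLowRest l else pvGroups l) := by
  intro l
  induction l with
  | nil =>
    intro reg low
    cases low <;>
      (rw [← String.toList_inj];
       simp [pvFinishA, pvLowRest, pvGroups, String.toList_append, String.toList_ofList])
  | cons c t ih =>
    intro reg low
    by_cases hc : PySem.Chars.islower c = true
    · have hL : c ≠ '[' := by rintro rfl; revert hc; decide
      have hR : c ≠ ']' := by rintro rfl; revert hc; decide
      cases low with
      | false =>
        simp only [List.foldl_cons, pvStepA, hc, Bool.not_true, Bool.false_and,
          if_neg hL, if_neg hR, if_true, if_false]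
        rw [ih]
        rw [pvGroups_cons_low t hc, ← String.toList_inj]
        simp [String.toList_append, String.toList_singleton, String.toList_push]
      | true =>
        simp only [List.foldl_cons, pvStepA, hc, Bool.not_true, Bool.false_and,
          if_neg hL, if_neg hR, if_true, if_false]
        rw [ih]
        rw [pvLowRest_cons_low t hc, ← String.toList_inj]
        simp [String.toList_append, String.toList_singleton, String.toList_push]
    · simp only [Bool.not_eq_true] at hc
      have hstep : pvStepA (reg, low) c
          = ((if low then reg ++ ")?" else reg) ++ pvProc c, false) := by
        simp only [pvStepA, pvProc, hc, Bool.not_false, Bool.true_and, if_true,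
          Bool.false_eq_true, if_false]
        split_ifs <;> simp only [Prod.mk.injEq, and_true, and_self] <;>
          first
          | rfl
          | (rw [← String.toList_inj]
             simp [String.toList_append, String.toList_singleton, String.toList_push])
      simp only [List.foldl_cons, hstep]
      rw [ih]
      cases low with
      | false =>
        rw [pvGroups_cons_nonlow t hc, ← String.toList_inj]
        simp [String.toList_append]
      | true =>
        rw [pvLowRest_cons_nonlow t hc, pvGroups_cons_nonlow t hc, ← String.toList_inj]
        simp [String.toList_append]

-- ===== VERDICT (by name: the statement is the Claim_ definition above) =====
theorem cmd_expr_to_reg_expr_str_spec : Claim_equal_cmd_expr_to_reg_expr_str := by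
  intro s _
  unfold Spec_cmd_expr_to_reg_expr_str cmd_expr_to_reg_expr_str cmd_expr_to_reg_expr_str_alt
  rw [pvMain s.toList "\\:?" false]
  rw [← String.toList_inj]
  simp [String.toList_append]
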